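-- pv_equiv track=rewrite | github.com/ujjwalgoyal2514/100DaysOfCoding | coverageOfAllZeroesInABinaryMatrix.py | FindCoverage
-- ===== SOURCE A (Python) =====
-- def FindCoverage(matrix):
--     row, col = len(matrix), len(matrix[0])
--     count = 0
--
--     for i in range(row):
--         for j in range(col):
--             if matrix[i][j]==0:
--                 if -1<i-1<row and matrix[i-1][j]==1:
--                     count+=1
--                 if -1<j-1<col and matrix[i][j-1]==1:
--                     count+=1
--                 if -1<j+1<col and matrix[i][j+1]==1:
--                     count+=1
--                 if -1<i+1<row and matrix[i+1][j]==1: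
--                     count+=1
--     return count
-- ===== SOURCE B (Python) =====
-- def FindCoverage(matrix):
--     row, col = len(matrix), len(matrix[0])
--     count = 0
--     for i in range(row):
--         for j in range(col):
--             a = matrix[i][j]
--             if j + 1 < col:
--                 b = matrix[i][j + 1]
--                 if (a == 0 and b == 1) or (a == 1 and b == 0):
--                     count += 1
--             if i + 1 < row:
--                 b = matrix[i + 1][j]
--                 if (a == 0 and b == 1) or (a == 1 and b == 0):
--                     count += 1
--     return count
-- ===== Notes on version B (the rewrite author's own statement) =====
-- stated objective: alternative
-- what changed: Counts each 0-1 adjacency once as an undirected edge by inspecting only the right and down neighbour of every cell, instead of checking all four neighbours of every zero cell.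
import Mathlib
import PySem

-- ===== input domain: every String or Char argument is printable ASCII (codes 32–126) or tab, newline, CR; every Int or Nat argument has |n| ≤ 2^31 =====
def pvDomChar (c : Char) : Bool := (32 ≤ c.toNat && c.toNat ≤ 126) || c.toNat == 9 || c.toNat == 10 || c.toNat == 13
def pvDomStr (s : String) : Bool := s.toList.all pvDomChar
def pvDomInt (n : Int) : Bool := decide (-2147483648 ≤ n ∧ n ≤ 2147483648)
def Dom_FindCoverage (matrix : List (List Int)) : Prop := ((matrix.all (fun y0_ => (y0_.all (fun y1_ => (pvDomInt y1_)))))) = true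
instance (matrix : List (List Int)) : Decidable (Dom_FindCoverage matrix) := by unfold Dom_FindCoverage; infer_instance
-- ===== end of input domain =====

-- B counts each 0-1 adjacency once as an undirected edge (looking only at the right and
-- down neighbour of every cell) instead of A's four-neighbour check around every zero cell.

-- ===== PORT A =====
def FindCoverage (matrix : List (List Int)) : Int :=
  let row : Int := matrix.length
  let col : Int := (PySem.List.pyGetD matrix 0 []).length
  (PySem.List.pyRange 0 row).foldl (fun count i =>
    (PySem.List.pyRange 0 col).foldl (fun count j =>
      if PySem.List.pyGetD (PySem.List.pyGetD matrix i []) j 0 = 0 then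
        let count := if -1 < i - 1 ∧ i - 1 < row ∧ PySem.List.pyGetD (PySem.List.pyGetD matrix (i - 1) []) j 0 = 1 then count + 1 else count
        let count := if -1 < j - 1 ∧ j - 1 < col ∧ PySem.List.pyGetD (PySem.List.pyGetD matrix i []) (j - 1) 0 = 1 then count + 1 else count
        let count := if -1 < j + 1 ∧ j + 1 < col ∧ PySem.List.pyGetD (PySem.List.pyGetD matrix i []) (j + 1) 0 = 1 then count + 1 else count
        let count := if -1 < i + 1 ∧ i + 1 < row ∧ PySem.List.pyGetD (PySem.List.pyGetD matrix (i + 1) []) j 0 = 1 then count + 1 else count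
        count
      else count) count) 0

-- ===== PORT B =====
def FindCoverage_alt (matrix : List (List Int)) : Int :=
  let row : Int := matrix.length
  let col : Int := (PySem.List.pyGetD matrix 0 []).length
  (PySem.List.pyRange 0 row).foldl (fun count i =>
    (PySem.List.pyRange 0 col).foldl (fun count j =>
      let a := PySem.List.pyGetD (PySem.List.pyGetD matrix i []) j 0
      let count :=
        if j + 1 < col then
          let b := PySem.List.pyGetD (PySem.List.pyGetD matrix i []) (j + 1) 0
          if (a = 0 ∧ b = 1) ∨ (a = 1 ∧ b = 0) then count + 1 else count
        else count
      let count :=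
        if i + 1 < row then
          let b := PySem.List.pyGetD (PySem.List.pyGetD matrix (i + 1) []) j 0
          if (a = 0 ∧ b = 1) ∨ (a = 1 ∧ b = 0) then count + 1 else count
        else count
      count) count) 0

-- ===== PRECONDITION & SPEC =====
-- Pre_ excludes exactly the inputs on which the Python A raises IndexError: the empty
-- matrix (len(matrix[0]) fails) and matrices having some row shorter than the first row.
def Pre_FindCoverage (matrix : List (List Int)) : Prop :=
  matrix ≠ [] ∧ ∀ r ∈ matrix, (matrix.getD 0 []).length ≤ r.length
instance (matrix : List (List Int)) : Decidable (Pre_FindCoverage matrix) := by unfold Pre_FindCoverage; infer_instance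
def pvWitness_FindCoverage : List (List Int) := [[0, 1], [1, 0]]
def Spec_FindCoverage (matrix : List (List Int)) (out : Int) : Prop := out = FindCoverage_alt matrix
instance (matrix : List (List Int)) (out : Int) : Decidable (Spec_FindCoverage matrix out) := by unfold Spec_FindCoverage; infer_instance

-- ===== CLAIM (what is proved, stated in full; the proofs are below) =====
def Claim_equal_FindCoverage : Prop := ∀ (matrix : List (List Int)), Dom_FindCoverage matrix → Pre_FindCoverage matrix → Spec_FindCoverage matrix (FindCoverage matrix)

-- ===== LEMMAS AND PROOFS =====

-- the cell value both ports read (out-of-range reads give the unused default 0)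
def gcell (m : List (List Int)) (i j : Nat) : Int := (m.getD i []).getD j 0

-- per-cell contribution of port A, Nat-indexed (bound conditions simplified using i < row, j < col)
def FA (m : List (List Int)) (i j : Nat) : Int :=
  if gcell m i j = 0 then
      (if 1 ≤ i ∧ gcell m (i - 1) j = 1 then 1 else 0)
    + (if 1 ≤ j ∧ gcell m i (j - 1) = 1 then 1 else 0)
    + (if j + 1 < (m.getD 0 []).length ∧ gcell m i (j + 1) = 1 then 1 else 0)
    + (if i + 1 < m.length ∧ gcell m (i + 1) j = 1 then 1 else 0)
  else 0

-- per-cell contribution of port B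
def FB (m : List (List Int)) (i j : Nat) : Int :=
    (if j + 1 < (m.getD 0 []).length ∧
        ((gcell m i j = 0 ∧ gcell m i (j + 1) = 1) ∨ (gcell m i j = 1 ∧ gcell m i (j + 1) = 0))
     then 1 else 0)
  + (if i + 1 < m.length ∧
        ((gcell m i j = 0 ∧ gcell m (i + 1) j = 1) ∨ (gcell m i j = 1 ∧ gcell m (i + 1) j = 0))
     then 1 else 0)

def sumOf (F : Nat → Nat → Int) (row col : Nat) : Int :=
  ((List.range row).map (fun i => ((List.range col).map (fun j => F i j)).sum)).sum

-- edge indicators (a right / down edge whose two endpoints are 0 and 1, in either order)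
def R0 (m : List (List Int)) (i j : Nat) : Int := if gcell m i j = 0 ∧ gcell m i (j + 1) = 1 then 1 else 0
def R1 (m : List (List Int)) (i j : Nat) : Int := if gcell m i j = 1 ∧ gcell m i (j + 1) = 0 then 1 else 0
def D0 (m : List (List Int)) (i j : Nat) : Int := if gcell m i j = 0 ∧ gcell m (i + 1) j = 1 then 1 else 0
def D1 (m : List (List Int)) (i j : Nat) : Int := if gcell m i j = 1 ∧ gcell m (i + 1) j = 0 then 1 else 0

lemma getD_zero (m : List (List Int)) : PySem.List.pyGetD m 0 [] = m.getD 0 [] := by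
  simpa using PySem.List.pyGetD_natCast m 0 []

lemma A_eq_sum (m : List (List Int)) :
    FindCoverage m = sumOf (FA m) m.length (m.getD 0 []).length := by
  simp only [FindCoverage]
  rw [getD_zero]
  rw [PySem.List.pyRange_zero_natCast, PySem.List.pyRange_zero_natCast]
  rw [List.foldl_map]
  rw [PySem.List.foldl_congr_mem _ _
      (fun count (i : Nat) => count + ((List.range (m.getD 0 []).length).map (fun j => FA m i j)).sum) 0 ?_]
  · rw [PySem.List.foldl_add]; simp [sumOf]
  · intro acc i hi
    simp only [List.mem_range] at hi
    rw [List.foldl_map]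
    rw [PySem.List.foldl_congr_mem _ _ (fun count (j : Nat) => count + FA m i j) acc ?_]
    · rw [PySem.List.foldl_add]
    · intro acc2 j hj
      simp only [List.mem_range] at hj
      have g1 : PySem.List.pyGetD (PySem.List.pyGetD m (↑i) []) (↑j) 0 = gcell m i j := by
        rw [PySem.List.pyGetD_natCast, PySem.List.pyGetD_natCast]; rfl
      have c1 : (-1 < (i:Int) - 1 ∧ (i:Int) - 1 < (m.length:Int) ∧
          PySem.List.pyGetD (PySem.List.pyGetD m ((i:Int) - 1) []) (j:Int) 0 = 1) ↔
          (1 ≤ i ∧ gcell m (i - 1) j = 1) := by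
        by_cases hi1 : 1 ≤ i
        · have hc : ((i:Int) - 1) = ((i - 1 : Nat) : Int) := by omega
          rw [hc, PySem.List.pyGetD_natCast, PySem.List.pyGetD_natCast]
          unfold gcell
          constructor
          · rintro ⟨-, -, h⟩; exact ⟨hi1, h⟩
          · rintro ⟨-, h⟩; exact ⟨by omega, by omega, h⟩
        · constructor
          · rintro ⟨h, -, -⟩; omega
          · rintro ⟨h, -⟩; omega
      have c2 : (-1 < (j:Int) - 1 ∧ (j:Int) - 1 < ((m.getD 0 []).length:Int) ∧
          PySem.List.pyGetD (PySem.List.pyGetD m (i:Int) []) ((j:Int) - 1) 0 = 1) ↔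
          (1 ≤ j ∧ gcell m i (j - 1) = 1) := by
        by_cases hj1 : 1 ≤ j
        · have hc : ((j:Int) - 1) = ((j - 1 : Nat) : Int) := by omega
          rw [hc, PySem.List.pyGetD_natCast, PySem.List.pyGetD_natCast]
          unfold gcell
          constructor
          · rintro ⟨-, -, h⟩; exact ⟨hj1, h⟩
          · rintro ⟨-, h⟩; exact ⟨by omega, by omega, h⟩
        · constructor
          · rintro ⟨h, -, -⟩; omega
          · rintro ⟨h, -⟩; omega
      have c3 : (-1 < (j:Int) + 1 ∧ (j:Int) + 1 < ((m.getD 0 []).length:Int) ∧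
          PySem.List.pyGetD (PySem.List.pyGetD m (i:Int) []) ((j:Int) + 1) 0 = 1) ↔
          (j + 1 < (m.getD 0 []).length ∧ gcell m i (j + 1) = 1) := by
        have hc : ((j:Int) + 1) = ((j + 1 : Nat) : Int) := by omega
        rw [hc, PySem.List.pyGetD_natCast, PySem.List.pyGetD_natCast]
        unfold gcell
        constructor
        · rintro ⟨-, h2, h⟩; exact ⟨by omega, h⟩
        · rintro ⟨h2, h⟩; exact ⟨by omega, by omega, h⟩
      have c4 : (-1 < (i:Int) + 1 ∧ (i:Int) + 1 < (m.length:Int) ∧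
          PySem.List.pyGetD (PySem.List.pyGetD m ((i:Int) + 1) []) (j:Int) 0 = 1) ↔
          (i + 1 < m.length ∧ gcell m (i + 1) j = 1) := by
        have hc : ((i:Int) + 1) = ((i + 1 : Nat) : Int) := by omega
        rw [hc, PySem.List.pyGetD_natCast, PySem.List.pyGetD_natCast]
        unfold gcell
        constructor
        · rintro ⟨-, h2, h⟩; exact ⟨by omega, h⟩
        · rintro ⟨h2, h⟩; exact ⟨by omega, by omega, h⟩
      simp only [g1, c1, c2, c3, c4, FA]
      split_ifs <;> omega

lemma B_eq_sum (m : List (List Int)) :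
    FindCoverage_alt m = sumOf (FB m) m.length (m.getD 0 []).length := by
  simp only [FindCoverage_alt]
  rw [getD_zero]
  rw [PySem.List.pyRange_zero_natCast, PySem.List.pyRange_zero_natCast]
  rw [List.foldl_map]
  rw [PySem.List.foldl_congr_mem _ _
      (fun count (i : Nat) => count + ((List.range (m.getD 0 []).length).map (fun j => FB m i j)).sum) 0 ?_]
  · rw [PySem.List.foldl_add]; simp [sumOf]
  · intro acc i hi
    simp only [List.mem_range] at hi
    rw [List.foldl_map]
    rw [PySem.List.foldl_congr_mem _ _ (fun count (j : Nat) => count + FB m i j) acc ?_]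
    · rw [PySem.List.foldl_add]
    · intro acc2 j hj
      simp only [List.mem_range] at hj
      have g1 : PySem.List.pyGetD (PySem.List.pyGetD m (↑i) []) (↑j) 0 = gcell m i j := by
        rw [PySem.List.pyGetD_natCast, PySem.List.pyGetD_natCast]; rfl
      have g3 : PySem.List.pyGetD (PySem.List.pyGetD m (i:Int) []) ((j:Int) + 1) 0 = gcell m i (j + 1) := by
        have hc : ((j:Int) + 1) = ((j + 1 : Nat) : Int) := by omega
        rw [hc, PySem.List.pyGetD_natCast, PySem.List.pyGetD_natCast]; rfl
      have g4 : PySem.List.pyGetD (PySem.List.pyGetD m ((i:Int) + 1) []) (j:Int) 0 = gcell m (i + 1) j := by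
        have hc : ((i:Int) + 1) = ((i + 1 : Nat) : Int) := by omega
        rw [hc, PySem.List.pyGetD_natCast, PySem.List.pyGetD_natCast]; rfl
      have b1 : ((j:Int) + 1 < ((m.getD 0 []).length:Int)) ↔ (j + 1 < (m.getD 0 []).length) := by omega
      have b2 : ((i:Int) + 1 < (m.length:Int)) ↔ (i + 1 < m.length) := by omega
      simp only [g1, g3, g4, b1, b2, FB]
      split_ifs <;> omega

-- re-indexing: summing "my left/up neighbour" over k ≥ 1 is summing "my right/down neighbour" over k + 1 < n
lemma shift_sum (n : Nat) (e : Nat → Int) :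
    ((List.range n).map (fun k => if 1 ≤ k then e (k - 1) else 0)).sum
      = ((List.range n).map (fun k => if k + 1 < n then e k else 0)).sum := by
  cases n with
  | zero => simp
  | succ m =>
    conv_lhs => rw [List.range_succ_eq_map]
    conv_rhs => rw [List.range_succ]
    simp only [List.map_cons, List.map_append, List.map_map, List.sum_cons, List.sum_append]
    have h1 : (List.map ((fun k => if 1 ≤ k then e (k - 1) else 0) ∘ Nat.succ) (List.range m)) = List.map e (List.range m) := by
      apply List.map_congr_left; intro x hx; simp
    have h2 : (List.map (fun k => if k < m then e k else 0) (List.range m)) = List.map e (List.range m) := by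
      apply List.map_congr_left; intro x hx; simp [List.mem_range.mp hx]
    simp [h1, h2]

lemma sumOf_congr (F G : Nat → Nat → Int) (row col : Nat) (h : ∀ i j, F i j = G i j) :
    sumOf F row col = sumOf G row col := by
  have : F = G := funext fun i => funext fun j => h i j
  rw [this]

lemma sumOf_add (F G : Nat → Nat → Int) (row col : Nat) :
    sumOf (fun i j => F i j + G i j) row col = sumOf F row col + sumOf G row col := by
  unfold sumOf
  rw [← PySem.List.sum_map_add_int]
  apply congrArg
  apply List.map_congr_left
  intro i _
  exact PySem.List.sum_map_add_int _ _ _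

lemma sum_ite_pull (c : Prop) [Decidable c] (l : List Nat) (f : Nat → Int) :
    (l.map (fun j => if c then f j else 0)).sum = if c then (l.map f).sum else 0 := by
  by_cases h : c <;> simp [h]

lemma S1_eq (m : List (List Int)) (row col : Nat) :
    sumOf (fun i j => if 1 ≤ i then D1 m (i - 1) j else 0) row col
      = sumOf (fun i j => if i + 1 < row then D1 m i j else 0) row col := by
  unfold sumOf
  calc ((List.range row).map (fun i => ((List.range col).map (fun j => if 1 ≤ i then D1 m (i - 1) j else 0)).sum)).sum
      = ((List.range row).map (fun i => if 1 ≤ i then ((List.range col).map (fun j => D1 m (i - 1) j)).sum else 0)).sum := by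
        apply congrArg; apply List.map_congr_left; intro i _; exact sum_ite_pull _ _ _
    _ = ((List.range row).map (fun i => if i + 1 < row then ((List.range col).map (fun j => D1 m i j)).sum else 0)).sum :=
        shift_sum row (fun k => ((List.range col).map (fun j => D1 m k j)).sum)
    _ = ((List.range row).map (fun i => ((List.range col).map (fun j => if i + 1 < row then D1 m i j else 0)).sum)).sum := by
        apply congrArg; apply List.map_congr_left; intro i _; exact (sum_ite_pull _ _ _).symm

lemma S2_eq (m : List (List Int)) (row col : Nat) :
    sumOf (fun i j => if 1 ≤ j then R1 m i (j - 1) else 0) row col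
      = sumOf (fun i j => if j + 1 < col then R1 m i j else 0) row col := by
  unfold sumOf
  apply congrArg
  apply List.map_congr_left
  intro i _
  exact shift_sum col (fun k => R1 m i k)

lemma ite_add4 (c : Prop) [Decidable c] (a b d e : Int) :
    (if c then a + b + d + e else 0) = ((if c then a else 0) + (if c then b else 0)) + ((if c then d else 0) + (if c then e else 0)) := by
  by_cases h : c
  · simp [h]; ring
  · simp [h]

lemma up_eq (m : List (List Int)) (i j : Nat) :
    (if gcell m i j = 0 then (if 1 ≤ i ∧ gcell m (i - 1) j = 1 then 1 else 0) else 0)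
      = (if 1 ≤ i then D1 m (i - 1) j else 0) := by
  rcases i with _ | i'
  · simp
  · simp only [Nat.succ_sub_one, D1]; split_ifs <;> omega

lemma left_eq (m : List (List Int)) (i j : Nat) :
    (if gcell m i j = 0 then (if 1 ≤ j ∧ gcell m i (j - 1) = 1 then 1 else 0) else 0)
      = (if 1 ≤ j then R1 m i (j - 1) else 0) := by
  rcases j with _ | j'
  · simp
  · simp only [Nat.succ_sub_one, R1]; split_ifs <;> omega

lemma right_eq (m : List (List Int)) (i j : Nat) :
    (if gcell m i j = 0 then (if j + 1 < (m.getD 0 []).length ∧ gcell m i (j + 1) = 1 then 1 else 0) else 0)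
      = (if j + 1 < (m.getD 0 []).length then R0 m i j else 0) := by
  simp only [R0]; split_ifs <;> omega

lemma down_eq (m : List (List Int)) (i j : Nat) :
    (if gcell m i j = 0 then (if i + 1 < m.length ∧ gcell m (i + 1) j = 1 then 1 else 0) else 0)
      = (if i + 1 < m.length then D0 m i j else 0) := by
  simp only [D0]; split_ifs <;> omega

lemma FA_decomp (m : List (List Int)) (i j : Nat) :
    FA m i j = ((if 1 ≤ i then D1 m (i - 1) j else 0)
      + (if 1 ≤ j then R1 m i (j - 1) else 0))
      + ((if j + 1 < (m.getD 0 []).length then R0 m i j else 0)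
      + (if i + 1 < m.length then D0 m i j else 0)) := by
  simp only [FA]
  rw [ite_add4, up_eq, left_eq, right_eq, down_eq]

lemma FB_decomp (m : List (List Int)) (i j : Nat) :
    FB m i j = ((if i + 1 < m.length then D1 m i j else 0)
      + (if j + 1 < (m.getD 0 []).length then R1 m i j else 0))
      + ((if j + 1 < (m.getD 0 []).length then R0 m i j else 0)
      + (if i + 1 < m.length then D0 m i j else 0)) := by
  simp only [FB, R0, R1, D0, D1]
  split_ifs <;> omega

lemma sums_eq (m : List (List Int)) :
    sumOf (FA m) m.length (m.getD 0 []).length = sumOf (FB m) m.length (m.getD 0 []).length := by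
  rw [sumOf_congr _ _ _ _ (FA_decomp m), sumOf_congr _ _ _ _ (FB_decomp m)]
  rw [sumOf_add, sumOf_add, sumOf_add, sumOf_add, sumOf_add, sumOf_add]
  rw [S1_eq, S2_eq]

-- ===== VERDICT (by name: the statement is the Claim_ definition above) =====
theorem FindCoverage_spec : Claim_equal_FindCoverage := by
  intro m _ _
  unfold Spec_FindCoverage
  rw [A_eq_sum, B_eq_sum, sums_eq]
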